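-- pv_equiv track=rewrite | github.com/hathewaygia/Patient-Specific-Needle-Placement-for-HDR-GYN-Brachytherapy | train_agent.py | _infer_fixed_max_path_points_from_obs_len
-- ===== SOURCE A (Python) =====
-- DEFAULT_MAX_NEEDLES = 10
--
-- DEFAULT_SLICE_SIZE = 32
--
-- DEFAULT_SLICE_OFFSETS = (-1, 0, 1)
--
-- DEFAULT_NUM_MASK_CHANNELS = 6
--
-- DEFAULT_DWELL_DS_STRIDE = 3
--
-- def _infer_fixed_max_path_points_from_obs_len(
--     obs_len: int,
--     max_needles: int = DEFAULT_MAX_NEEDLES,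
--     slice_size: int = DEFAULT_SLICE_SIZE,
--     slice_offsets=DEFAULT_SLICE_OFFSETS,
--     num_mask_channels: int = DEFAULT_NUM_MASK_CHANNELS,
--     dwell_ds_stride: int = DEFAULT_DWELL_DS_STRIDE,
-- ) -> int | None:
--     if obs_len <= 0:
--         return None
--     slice_dim = len(slice_offsets) * 3 * (1 + num_mask_channels) * slice_size * slice_size
--     fixed = (12 + 3) + 5 + slice_dim
--     dwell_ds_len = obs_len - fixed
--     if dwell_ds_len <= 0:
--         return None
--     min_flat = (dwell_ds_len - 1) * dwell_ds_stride + 1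
--     max_flat = dwell_ds_len * dwell_ds_stride
--     candidates = []
--     for mpp in range(1, 512):
--         flat_len = max_needles * mpp
--         if min_flat <= flat_len <= max_flat:
--             candidates.append(mpp)
--     if not candidates:
--         return None
--     if len(candidates) == 1:
--         return candidates[0]
--     return min(candidates, key=lambda m: abs(max_flat - max_needles * m))
-- ===== SOURCE B (Python) =====
-- DEFAULT_MAX_NEEDLES = 10
-- DEFAULT_SLICE_SIZE = 32
-- DEFAULT_SLICE_OFFSETS = (-1, 0, 1)
-- DEFAULT_NUM_MASK_CHANNELS = 6
-- DEFAULT_DWELL_DS_STRIDE = 3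
--
--
-- def _infer_fixed_max_path_points_from_obs_len(
--     obs_len: int,
--     max_needles: int = DEFAULT_MAX_NEEDLES,
--     slice_size: int = DEFAULT_SLICE_SIZE,
--     slice_offsets=DEFAULT_SLICE_OFFSETS,
--     num_mask_channels: int = DEFAULT_NUM_MASK_CHANNELS,
--     dwell_ds_stride: int = DEFAULT_DWELL_DS_STRIDE,
-- ) -> int | None:
--     # Closed form: the scan's argmin(|max_flat - max_needles*m|) is always the
--     # largest m in [1, 511] with min_flat <= max_needles*m <= max_flat.
--     if obs_len <= 0:
--         return None
--     slice_dim = len(slice_offsets) * 3 * (1 + num_mask_channels) * slice_size * slice_size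
--     dwell_ds_len = obs_len - (20 + slice_dim)
--     if dwell_ds_len <= 0:
--         return None
--     if max_needles <= 0 or dwell_ds_stride <= 0:
--         return None
--     min_flat = (dwell_ds_len - 1) * dwell_ds_stride + 1
--     max_flat = dwell_ds_len * dwell_ds_stride
--     hi = min(511, max_flat // max_needles)
--     lo = max(1, -((-min_flat) // max_needles))
--     return hi if lo <= hi else None
-- ===== Notes on version B (the rewrite author's own statement) =====
-- stated objective: faster
-- what changed: Replaces the 511-iteration candidate scan plus min-by-key with a closed form: the winning candidate is always the largest valid m, computed directly by floor/ceil division and clamping to [1,511].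
import Mathlib
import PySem

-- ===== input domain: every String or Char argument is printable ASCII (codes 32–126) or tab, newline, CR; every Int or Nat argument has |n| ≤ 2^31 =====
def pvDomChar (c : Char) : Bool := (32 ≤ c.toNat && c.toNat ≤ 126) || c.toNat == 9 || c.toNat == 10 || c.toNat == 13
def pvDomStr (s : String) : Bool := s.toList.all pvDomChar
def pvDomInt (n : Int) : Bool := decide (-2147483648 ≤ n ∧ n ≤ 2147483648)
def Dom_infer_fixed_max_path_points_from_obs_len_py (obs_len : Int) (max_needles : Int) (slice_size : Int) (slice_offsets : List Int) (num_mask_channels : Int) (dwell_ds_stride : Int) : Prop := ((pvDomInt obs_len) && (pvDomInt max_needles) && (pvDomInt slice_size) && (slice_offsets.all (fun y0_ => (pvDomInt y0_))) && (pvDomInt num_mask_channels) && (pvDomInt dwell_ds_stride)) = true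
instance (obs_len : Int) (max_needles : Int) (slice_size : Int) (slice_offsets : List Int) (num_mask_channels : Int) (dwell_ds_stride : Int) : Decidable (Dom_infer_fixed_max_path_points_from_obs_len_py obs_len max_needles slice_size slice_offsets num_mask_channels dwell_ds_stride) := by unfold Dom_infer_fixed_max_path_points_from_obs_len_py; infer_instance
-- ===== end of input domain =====

-- B replaces A's 511-step candidate scan + min-by-key with a closed-form
-- floor/ceil-division computation of the largest valid candidate (faster by a constant factor).

-- ===== PORT A =====
def infer_fixed_max_path_points_from_obs_len_py (obs_len : Int) (max_needles : Int) (slice_size : Int) (slice_offsets : List Int) (num_mask_channels : Int) (dwell_ds_stride : Int) : Option Int :=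
  if obs_len ≤ 0 then none
  else
    let slice_dim : Int := (slice_offsets.length : Int) * 3 * (1 + num_mask_channels) * slice_size * slice_size
    let fixed : Int := (12 + 3) + 5 + slice_dim
    let dwell_ds_len : Int := obs_len - fixed
    if dwell_ds_len ≤ 0 then none
    else
      let min_flat : Int := (dwell_ds_len - 1) * dwell_ds_stride + 1
      let max_flat : Int := dwell_ds_len * dwell_ds_stride
      let candidates : List Int :=
        (PySem.List.pyRange 1 512 1).foldl
          (fun acc mpp =>
            let flat_len := max_needles * mpp
            if min_flat ≤ flat_len ∧ flat_len ≤ max_flat then acc ++ [mpp] else acc) []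
      if candidates = [] then none
      else if candidates.length == 1 then PySem.List.pyGet? candidates 0
      else PySem.List.min? candidates (fun m => |max_flat - max_needles * m|)

-- ===== PORT B =====
def infer_fixed_max_path_points_from_obs_len_py_alt (obs_len : Int) (max_needles : Int) (slice_size : Int) (slice_offsets : List Int) (num_mask_channels : Int) (dwell_ds_stride : Int) : Option Int :=
  if obs_len ≤ 0 then none
  else
    let slice_dim : Int := (slice_offsets.length : Int) * 3 * (1 + num_mask_channels) * slice_size * slice_size
    let dwell_ds_len : Int := obs_len - (20 + slice_dim)
    if dwell_ds_len ≤ 0 then none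
    else if max_needles ≤ 0 ∨ dwell_ds_stride ≤ 0 then none
    else
      let min_flat : Int := (dwell_ds_len - 1) * dwell_ds_stride + 1
      let max_flat : Int := dwell_ds_len * dwell_ds_stride
      let hi : Int := min 511 (PySem.Int.floordiv max_flat max_needles)
      let lo : Int := max 1 (-(PySem.Int.floordiv (-min_flat) max_needles))
      if lo ≤ hi then some hi else none

-- ===== PRECONDITION & SPEC =====
def Spec_infer_fixed_max_path_points_from_obs_len_py (obs_len : Int) (max_needles : Int) (slice_size : Int) (slice_offsets : List Int) (num_mask_channels : Int) (dwell_ds_stride : Int) (out : Option Int) : Prop := out = infer_fixed_max_path_points_from_obs_len_py_alt obs_len max_needles slice_size slice_offsets num_mask_channels dwell_ds_stride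
instance (obs_len : Int) (max_needles : Int) (slice_size : Int) (slice_offsets : List Int) (num_mask_channels : Int) (dwell_ds_stride : Int) (out : Option Int) : Decidable (Spec_infer_fixed_max_path_points_from_obs_len_py obs_len max_needles slice_size slice_offsets num_mask_channels dwell_ds_stride out) := by unfold Spec_infer_fixed_max_path_points_from_obs_len_py; infer_instance

-- ===== CLAIM (what is proved, stated in full; the proofs are below) =====
def Claim_equal_infer_fixed_max_path_points_from_obs_len_py : Prop := ∀ (obs_len : Int) (max_needles : Int) (slice_size : Int) (slice_offsets : List Int) (num_mask_channels : Int) (dwell_ds_stride : Int), Dom_infer_fixed_max_path_points_from_obs_len_py obs_len max_needles slice_size slice_offsets num_mask_channels dwell_ds_stride → Spec_infer_fixed_max_path_points_from_obs_len_py obs_len max_needles slice_size slice_offsets num_mask_channels dwell_ds_stride (infer_fixed_max_path_points_from_obs_len_py obs_len max_needles slice_size slice_offsets num_mask_channels dwell_ds_stride)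

-- ===== LEMMAS AND PROOFS =====

-- A's candidate loop is a filter over range(1, 512).
theorem pvCand_eq_filter (min_flat max_flat mn : Int) :
    (PySem.List.pyRange 1 512 1).foldl
      (fun acc mpp =>
        let flat_len := mn * mpp
        if min_flat ≤ flat_len ∧ flat_len ≤ max_flat then acc ++ [mpp] else acc) []
    = (PySem.List.pyRange 1 512 1).filter
        (fun mpp => decide (min_flat ≤ mn * mpp ∧ mn * mpp ≤ max_flat)) := by
  simpa using PySem.List.foldl_append_ite_eq_filter
    (l := PySem.List.pyRange 1 512 1)
    (p := fun mpp => min_flat ≤ mn * mpp ∧ mn * mpp ≤ max_flat) (acc := [])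

theorem pvMem_cand (min_flat max_flat mn m : Int) :
    m ∈ (PySem.List.pyRange 1 512 1).filter
        (fun mpp => decide (min_flat ≤ mn * mpp ∧ mn * mpp ≤ max_flat))
    ↔ (1 ≤ m ∧ m < 512) ∧ (min_flat ≤ mn * m ∧ mn * m ≤ max_flat) := by
  simp [List.mem_filter, PySem.List.mem_pyRange_one]

-- interval characterisation of the candidate condition via floor/ceil division
theorem pvCond_iff (min_flat max_flat mn m : Int) (hmn : 0 < mn) :
    (min_flat ≤ mn * m ∧ mn * m ≤ max_flat)
    ↔ (-(PySem.Int.floordiv (-min_flat) mn) ≤ m ∧ m ≤ PySem.Int.floordiv max_flat mn) := by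
  constructor
  · rintro ⟨h1, h2⟩
    refine ⟨?_, ?_⟩
    · by_contra h
      have h' : m < -(PySem.Int.floordiv (-min_flat) mn) := by omega
      have := (PySem.Int.le_floordiv_iff_mul_le (a := -min_flat) (b := mn) (q := -m) hmn).2
        (by nlinarith)
      omega
    · exact (PySem.Int.le_floordiv_iff_mul_le (a := max_flat) (b := mn) (q := m) hmn).2
        (by nlinarith)
  · rintro ⟨h1, h2⟩
    have h2' := (PySem.Int.le_floordiv_iff_mul_le (a := max_flat) (b := mn) (q := m) hmn).1 h2
    have h1' := (PySem.Int.le_floordiv_iff_mul_le (a := -min_flat) (b := mn) (q := PySem.Int.floordiv (-min_flat) mn) hmn).1 le_rfl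
    have hmul : -m * mn ≤ PySem.Int.floordiv (-min_flat) mn * mn := by
      have : -m ≤ PySem.Int.floordiv (-min_flat) mn := by omega
      exact mul_le_mul_of_nonneg_right this (le_of_lt hmn)
    constructor
    · nlinarith
    · nlinarith

-- ===== VERDICT (by name: the statement is the Claim_ definition above) =====
theorem infer_fixed_max_path_points_from_obs_len_py_spec : Claim_equal_infer_fixed_max_path_points_from_obs_len_py := by
  intro obs_len mn ss offs nmc s _
  unfold Spec_infer_fixed_max_path_points_from_obs_len_py
  unfold infer_fixed_max_path_points_from_obs_len_py infer_fixed_max_path_points_from_obs_len_py_alt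
  by_cases h0 : obs_len ≤ 0
  · simp [h0]
  · simp only [h0, if_false]
    set slice_dim : Int := (offs.length : Int) * 3 * (1 + nmc) * ss * ss with hsd
    have hfix : (12 + 3) + 5 + slice_dim = 20 + slice_dim := by ring
    rw [hfix]
    set d : Int := obs_len - (20 + slice_dim) with hd
    by_cases hdle : d ≤ 0
    · simp [hdle]
    · simp only [hdle, if_false]
      set min_flat : Int := (d - 1) * s + 1 with hminf
      set max_flat : Int := d * s with hmaxf
      rw [pvCand_eq_filter]
      set cand : List Int := (PySem.List.pyRange 1 512 1).filter
        (fun mpp => decide (min_flat ≤ mn * mpp ∧ mn * mpp ≤ max_flat)) with hcand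
      by_cases hbad : mn ≤ 0 ∨ s ≤ 0
      · -- no candidates: either mn*m ≤ 0 < min_flat, or the interval is empty (s ≤ 0)
        have hnil : cand = [] := by
          rw [List.eq_nil_iff_forall_not_mem]
          intro m hm
          have := (pvMem_cand min_flat max_flat mn m).1 hm
          rcases hbad with hb | hb
          · have hle : mn * m ≤ 0 := mul_nonpos_of_nonpos_of_nonneg hb (by omega)
            have : (1 : Int) ≤ min_flat := by
              have : 0 ≤ (d - 1) * s := by
                by_cases hsle : s ≤ 0
                · nlinarith [this.2.1, this.2.2, hle]
                · exact mul_nonneg (by omega) (by omega)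
              omega
            omega
          · have : max_flat - min_flat = s - 1 := by rw [hminf, hmaxf]; ring
            omega
        simp [hnil, hbad]
      · rw [not_or] at hbad
        have hmn : 0 < mn := by omega
        have hs : 0 < s := by omega
        simp only [if_neg (by rw [not_or]; exact ⟨by omega, by omega⟩ :
          ¬(mn ≤ 0 ∨ s ≤ 0))]
        set hi : Int := min 511 (PySem.Int.floordiv max_flat mn) with hhi
        set lo : Int := max 1 (-(PySem.Int.floordiv (-min_flat) mn)) with hlo
        have hmem : ∀ m : Int, m ∈ cand ↔ lo ≤ m ∧ m ≤ hi := by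
          intro m
          rw [hcand, pvMem_cand, pvCond_iff min_flat max_flat mn m hmn]
          constructor
          · rintro ⟨⟨ha, hb⟩, hc, hd'⟩
            exact ⟨by simp [hlo]; omega, by simp [hhi]; omega⟩
          · rintro ⟨ha, hb⟩
            rw [hlo] at ha; rw [hhi] at hb
            refine ⟨⟨by omega, by omega⟩, by omega, by omega⟩
        by_cases hle : lo ≤ hi
        · have hhimem : hi ∈ cand := (hmem hi).2 ⟨hle, le_rfl⟩
          have hne : cand ≠ [] := by
            intro hnil; rw [hnil] at hhimem; exact (List.not_mem_nil) hhimem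
          simp only [if_neg hne, if_pos hle]
          -- A returns hi via either the singleton branch or the min-by-key branch
          by_cases hlen : cand.length == 1
          · obtain ⟨c, hc⟩ : ∃ c, cand = [c] :=
              List.length_eq_one_iff.1 (by simpa using hlen)
            have : hi = c := by
              rw [hc] at hhimem; simpa using hhimem
            simp [hc, PySem.List.pyGet?, PySem.List.pyIdx?, this]
          · rw [if_neg hlen]
            -- the key is strictly smaller at hi than at any other candidate
            obtain ⟨m, hmin⟩ : ∃ m, PySem.List.min? cand (fun x => |max_flat - mn * x|) = some m := by
              cases hq : PySem.List.min? cand (fun x => |max_flat - mn * x|) with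
              | none => exact absurd ((PySem.List.min?_eq_none_iff _ _).1 hq) hne
              | some m => exact ⟨m, rfl⟩
            have hm_mem : m ∈ cand := PySem.List.min?_mem hmin
            have hm_min := PySem.List.min?_isMin hmin hi hhimem
            have hm_iv := (hmem m).1 hm_mem
            have hhi_iv := (hmem hi).1 hhimem
            -- both keys are the nonnegative distances below max_flat
            have hmle : mn * m ≤ max_flat := ((pvMem_cand _ _ _ _).1 hm_mem).2.2
            have hhile : mn * hi ≤ max_flat := ((pvMem_cand _ _ _ _).1 hhimem).2.2
            have habs1 : |max_flat - mn * m| = max_flat - mn * m := abs_of_nonneg (by omega)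
            have habs2 : |max_flat - mn * hi| = max_flat - mn * hi := abs_of_nonneg (by omega)
            have hmeqhi : m = hi := by
              rcases lt_or_eq_of_le hm_iv.2 with hlt | heq
              · exfalso
                have : mn * m < mn * hi := by
                  exact mul_lt_mul_of_pos_left hlt hmn
                rw [habs1, habs2] at hm_min
                omega
              · exact heq
            rw [hmin, hmeqhi]
        · have hnil : cand = [] := by
            rw [List.eq_nil_iff_forall_not_mem]
            intro m hm
            have := (hmem m).1 hm
            omega
          simp [hnil, hle]
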